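-- pv_equiv track=rewrite | github.com/alexeyshmelev/Yandex_internship_preparation | algorithm/theme_2/simmetric_sequence.py | remains_palindrome
-- ===== SOURCE A (Python) =====
-- def remains_palindrome(seq):
--     for point in range(len(seq)):
--         i = point
--         j = len(seq) - 1
--         while j >= i and seq[i] == seq[j]:
--             j -= 1
--             i += 1
--         if i > j:
--             ans = []
--             for k in range(point-1, -1, -1):
--                 ans.append(seq[k])
--             return ans
-- ===== SOURCE B (Python) =====
-- def remains_palindrome(seq):
--     if not seq:
--         return None
--     rev = seq[::-1]
--     n = len(seq)
--     last = seq[-1]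
--     for p in range(n):
--         # a palindromic suffix must start with the last element (cheap pre-test),
--         # and then it equals the first n-p items of the reversed copy
--         if seq[p] == last and seq[p:] == rev[:n - p]:
--             return rev[n - p:]
-- ===== Notes on version B (the rewrite author's own statement) =====
-- stated objective: alternative
-- what changed: replaces the hand-written two-pointer while-loop and the element-by-element answer-building loop with one precomputed reversed copy: the palindromic-suffix test becomes a whole-slice comparison against a prefix of the reverse, and the answer is returned as a slice of the reverse
import Mathlib
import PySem

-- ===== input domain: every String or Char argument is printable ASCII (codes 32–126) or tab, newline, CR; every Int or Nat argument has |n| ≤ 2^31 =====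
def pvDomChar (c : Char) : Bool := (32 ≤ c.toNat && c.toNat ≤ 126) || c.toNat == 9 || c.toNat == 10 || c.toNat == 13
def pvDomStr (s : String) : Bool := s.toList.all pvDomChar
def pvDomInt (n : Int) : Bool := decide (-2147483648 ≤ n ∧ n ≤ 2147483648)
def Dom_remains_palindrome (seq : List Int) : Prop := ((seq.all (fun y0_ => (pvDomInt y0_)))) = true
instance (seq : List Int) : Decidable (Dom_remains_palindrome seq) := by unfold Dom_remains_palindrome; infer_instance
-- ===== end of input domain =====

-- B replaces A's two-pointer while-loop and element-by-element answer building by slice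
-- comparisons against one precomputed reversed copy (objective: alternative, same asymptotics).

-- ===== PORT A =====
-- inner 'while j >= i and seq[i] == seq[j]: j -= 1; i += 1' (accesses only happen with 0 ≤ i ≤ j < len, where pyGet? is exact)
def pvWhileA (seq : List Int) (i j : Int) : Int × Int :=
  if _h : j ≥ i ∧ PySem.List.pyGet? seq i = PySem.List.pyGet? seq j then
    pvWhileA seq (i + 1) (j - 1)
  else (i, j)
termination_by (j - i + 1).toNat
decreasing_by omega

-- 'ans = []; for k in range(point-1, -1, -1): ans.append(seq[k])' as a countdown recursion
-- (k always in range here, so pyGetD is exact for seq[k])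
def pvBuildA (seq : List Int) (k : Int) (ans : List Int) : List Int :=
  if _h : k ≥ 0 then pvBuildA seq (k - 1) (ans ++ [PySem.List.pyGetD seq k 0]) else ans
termination_by (k + 1).toNat
decreasing_by omega

-- 'for point in range(len(seq)): …' with the early return; falling off the end gives None
def pvLoopA (seq : List Int) (point : Int) : Option (List Int) :=
  if _h : point < (seq.length : Int) then
    let r := pvWhileA seq point ((seq.length : Int) - 1)
    if r.1 > r.2 then some (pvBuildA seq (point - 1) [])
    else pvLoopA seq (point + 1)
  else none
termination_by ((seq.length : Int) - point).toNat
decreasing_by omega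

def remains_palindrome (seq : List Int) : Option (List Int) := pvLoopA seq 0

-- ===== PORT B =====
-- 'for p in range(n): if seq[p] == last and seq[p:] == rev[:n-p]: return rev[n-p:]'
-- (p is always in range here, so pyGetD is exact for seq[p])
def pvLoopB (seq rev : List Int) (n last p : Int) : Option (List Int) :=
  if _h : p < n then
    if PySem.List.pyGetD seq p 0 = last ∧
        PySem.List.slice seq (some p) none = PySem.List.slice rev none (some (n - p)) then
      some (PySem.List.slice rev (some (n - p)) none)
    else pvLoopB seq rev n last (p + 1)
  else none
termination_by (n - p).toNat
decreasing_by omega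

def remains_palindrome_alt (seq : List Int) : Option (List Int) :=
  if seq = [] then none
  else
    -- rev = seq[::-1] is seq.reverse (PySem.List.slice?_none_none_neg_one); last = seq[-1]
    pvLoopB seq seq.reverse (seq.length : Int) (PySem.List.pyGetD seq (-1) 0) 0

-- ===== PRECONDITION & SPEC =====
def Spec_remains_palindrome (seq : List Int) (out : Option (List Int)) : Prop := out = remains_palindrome_alt seq
instance (seq : List Int) (out : Option (List Int)) : Decidable (Spec_remains_palindrome seq out) := by unfold Spec_remains_palindrome; infer_instance

-- ===== CLAIM (what is proved, stated in full; the proofs are below) =====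
def Claim_equal_remains_palindrome : Prop := ∀ (seq : List Int), Dom_remains_palindrome seq → Spec_remains_palindrome seq (remains_palindrome seq)

-- ===== LEMMAS AND PROOFS =====

lemma pvGet_some (seq : List Int) (i : Int) (h0 : 0 ≤ i) (h : i < (seq.length : Int)) :
    PySem.List.pyGet? seq i = some (seq.getD i.toNat 0) := by
  have hn : i.toNat < seq.length := by omega
  simp [PySem.List.pyGet?, PySem.List.pyIdx?, h0, h]

-- the reversed-prefix builder equals reverse ∘ take
lemma pvBuild_eq (seq : List Int) (m : Nat) (hm : m ≤ seq.length) :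
    ∀ ans, pvBuildA seq ((m : Int) - 1) ans = ans ++ (seq.take m).reverse := by
  induction m with
  | zero => intro ans; rw [pvBuildA]; simp
  | succ m ih =>
    intro ans
    have hmlt : m < seq.length := by omega
    rw [pvBuildA]
    rw [dif_pos (by push_cast; omega)]
    push_cast
    rw [show ((m : Int) + 1 - 1 - 1 : Int) = (m : Int) - 1 by ring,
        show ((m : Int) + 1 - 1 : Int) = (m : Int) by ring]
    rw [ih (by omega), PySem.List.pyGetD_natCast, List.getD_eq_getElem _ _ hmlt,
        List.take_add_one, List.getElem?_eq_getElem hmlt, Option.toList_some,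
        List.reverse_append, List.reverse_singleton, List.singleton_append]
    simp

-- palindromic decomposition of the segment seq[i..j]
lemma seg_decomp (seq : List Int) (i j : Int) (h0 : 0 ≤ i) (hij : i < j) (hj : j < (seq.length : Int)) :
    (seq.drop i.toNat).take (j + 1 - i).toNat
      = seq.getD i.toNat 0 ::
        (((seq.drop (i.toNat + 1)).take (j - 1 + 1 - (i + 1)).toNat) ++ [seq.getD j.toNat 0]) := by
  have hi : i.toNat < seq.length := by omega
  have hjn : j.toNat < seq.length := by omega
  have hd : seq.drop i.toNat = seq[i.toNat] :: seq.drop (i.toNat + 1) := List.drop_eq_getElem_cons hi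
  have ht : (j + 1 - i).toNat = (j - 1 + 1 - (i + 1)).toNat + 2 := by omega
  rw [hd, ht]
  set t := (j - 1 + 1 - (i + 1)).toNat with htdef
  have : (seq.drop (i.toNat + 1)).take (t + 1)
      = (seq.drop (i.toNat + 1)).take t ++ [seq.getD j.toNat 0] := by
    rw [List.take_add_one]
    have hidx : i.toNat + 1 + t = j.toNat := by omega
    have : (seq.drop (i.toNat + 1))[t]? = some seq[j.toNat] := by
      rw [List.getElem?_drop]
      rw [hidx]
      exact List.getElem?_eq_getElem hjn
    simp [this, List.getD, List.getElem?_eq_getElem hjn]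
  rw [List.take_succ_cons, this]
  simp [List.getD, List.getElem?_eq_getElem hi]

lemma pal_cons_append (a b : Int) (m : List Int) :
    (a :: (m ++ [b])) = (a :: (m ++ [b])).reverse ↔ (a = b ∧ m = m.reverse) := by
  constructor
  · intro h
    rw [List.reverse_cons, List.reverse_append, List.reverse_singleton] at h
    simp only [List.cons_append, List.cons.injEq] at h
    obtain ⟨hab, hrest⟩ := h
    subst hab
    exact ⟨rfl, by simpa using hrest⟩
  · rintro ⟨hab, hm⟩
    subst hab
    rw [List.reverse_cons, List.reverse_append, List.reverse_singleton]
    simp [← hm]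

lemma short_pal (s : List Int) (h : s.length ≤ 1) : s = s.reverse := by
  match s with
  | [] => rfl
  | [a] => rfl
  | a :: b :: t => simp at h

-- A's two-pointer loop decides palindromicity of the segment seq[i..j]
lemma pvWhile_iff (seq : List Int) :
    ∀ (d : Nat) (i j : Int), (j - i + 1).toNat ≤ d → 0 ≤ i → j < (seq.length : Int) →
    ((pvWhileA seq i j).2 < (pvWhileA seq i j).1 ↔
      (seq.drop i.toNat).take (j + 1 - i).toNat
        = ((seq.drop i.toNat).take (j + 1 - i).toNat).reverse) := by
  intro d
  induction d with
  | zero =>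
    intro i j hd h0 hj
    have hji : j < i := by omega
    rw [pvWhileA]
    have hcond : ¬ (j ≥ i ∧ PySem.List.pyGet? seq i = PySem.List.pyGet? seq j) := by
      rintro ⟨h, -⟩; omega
    rw [dif_neg hcond]
    have : (j + 1 - i).toNat = 0 := by omega
    simp [this, hji]
  | succ d ih =>
    intro i j hd h0 hj
    rw [pvWhileA]
    by_cases hcond : j ≥ i ∧ PySem.List.pyGet? seq i = PySem.List.pyGet? seq j
    · obtain ⟨hji, hget⟩ := hcond
      have hjnn : 0 ≤ j := by omega
      rw [pvGet_some seq i h0 (by omega), pvGet_some seq j hjnn hj] at hget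
      have heq : seq.getD i.toNat 0 = seq.getD j.toNat 0 := by injection hget
      rw [dif_pos ⟨hji, by rw [pvGet_some seq i h0 (by omega), pvGet_some seq j hjnn hj, heq]⟩]
      by_cases hij : i = j
      · subst hij
        rw [pvWhileA]
        have : ¬ (i - 1 ≥ i + 1 ∧ PySem.List.pyGet? seq (i+1) = PySem.List.pyGet? seq (i-1)) := by
          rintro ⟨h, -⟩; omega
        rw [dif_neg this]
        simp only []
        constructor
        · intro _
          exact short_pal _ (by
            have := List.length_take_le (i + 1 - i).toNat (seq.drop i.toNat)
            omega)
        · intro _; omega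
      · have hlt : i < j := by omega
        have hrec := ih (i + 1) (j - 1) (by omega) (by omega) (by omega)
        have hto : (i + 1).toNat = i.toNat + 1 := by omega
        rw [hto] at hrec
        rw [seg_decomp seq i j h0 hlt hj, heq, pal_cons_append]
        rw [hrec]
        constructor
        · intro h; exact ⟨rfl, h⟩
        · intro h; exact h.2
    · rw [dif_neg hcond]
      by_cases hji : j < i
      · have : (j + 1 - i).toNat = 0 := by omega
        simp [this, hji]
      · have hij : i ≤ j := by omega
        have hne : PySem.List.pyGet? seq i ≠ PySem.List.pyGet? seq j := by
          intro hc; exact hcond ⟨by omega, hc⟩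
        simp only []
        constructor
        · intro h; omega
        · intro hpal
          exfalso
          by_cases hij : i = j
          · subst hij
            exact hne rfl
          · have hlt : i < j := by omega
            rw [seg_decomp seq i j h0 hlt hj, pal_cons_append] at hpal
            apply hne
            rw [pvGet_some seq i h0 (by omega), pvGet_some seq j (by omega) hj, hpal.1]

-- a palindromic suffix starts with the list's last element
lemma pal_head_last (seq : List Int) (p : Int) (h0 : 0 ≤ p) (hp : p < (seq.length : Int))
    (hpal : seq.drop p.toNat = (seq.drop p.toNat).reverse) :
    PySem.List.pyGetD seq p 0 = PySem.List.pyGetD seq (-1) 0 := by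
  have hne : seq ≠ [] := by intro h; subst h; simp at hp; omega
  have hlt : p.toNat < seq.length := by omega
  rw [PySem.List.pyGetD_eq_getElem seq 0 h0 hp, PySem.List.pyGetD_neg_one seq 0 hne]
  have h1 : (seq.drop p.toNat).head? = some seq[p.toNat] := by
    rw [List.head?_drop]; exact List.getElem?_eq_getElem hlt
  have h2 : (seq.drop p.toNat).getLast? = some (seq.getLast hne) := by
    have : (seq.drop p.toNat).getLast? = seq.getLast? := by
      simp [List.getLast?_drop]; omega
    rw [this]; exact List.getLast?_eq_some_getLast hne
  have h3 : (seq.drop p.toNat).head? = (seq.drop p.toNat).getLast? := by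
    conv_lhs => rw [hpal]
    exact List.head?_reverse
  rw [h1, h2] at h3
  injection h3

-- the two outer loops agree
lemma loops_eq (seq : List Int) :
    ∀ (d : Nat) (p : Int), ((seq.length : Int) - p).toNat ≤ d → 0 ≤ p →
    pvLoopA seq p = pvLoopB seq seq.reverse (seq.length : Int) (PySem.List.pyGetD seq (-1) 0) p := by
  intro d
  induction d with
  | zero =>
    intro p hd h0
    rw [pvLoopA, pvLoopB]
    rw [dif_neg (by omega), dif_neg (by omega)]
  | succ d ih =>
    intro p hd h0
    rw [pvLoopA, pvLoopB]
    by_cases hp : p < (seq.length : Int)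
    · rw [dif_pos hp, dif_pos hp]
      have hwhile := pvWhile_iff seq (((seq.length : Int) - 1) - p + 1).toNat p ((seq.length : Int) - 1)
        (le_refl _) h0 (by omega)
      have hseg : (seq.drop p.toNat).take ((seq.length : Int) - 1 + 1 - p).toNat = seq.drop p.toNat := by
        apply List.take_of_length_le
        simp; omega
      rw [hseg] at hwhile
      -- B's condition is the same palindrome test
      have hcondB : (PySem.List.slice seq (some p) none = PySem.List.slice seq.reverse none (some ((seq.length : Int) - p)))
          ↔ (seq.drop p.toNat = (seq.drop p.toNat).reverse) := by
        rw [PySem.List.slice_from _ h0, PySem.List.slice_to _ (by omega)]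
        have : seq.reverse.take ((seq.length : Int) - p).toNat
            = (seq.drop (seq.length - ((seq.length : Int) - p).toNat)).reverse := List.take_reverse
        rw [this]
        have hnat : seq.length - ((seq.length : Int) - p).toNat = p.toNat := by omega
        rw [hnat]
      by_cases hA : (pvWhileA seq p ((seq.length : Int) - 1)).1 > (pvWhileA seq p ((seq.length : Int) - 1)).2
      · have hpal := hwhile.mp hA
        rw [if_pos hA, if_pos ⟨pal_head_last seq p h0 hp hpal, hcondB.mpr hpal⟩]
        -- both return the reversed prefix
        have hbuild : pvBuildA seq (p - 1) [] = (seq.take p.toNat).reverse := by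
          have hcast : ((p.toNat : Int) - 1 : Int) = p - 1 := by omega
          have := pvBuild_eq seq p.toNat (by omega) []
          rw [hcast] at this
          simpa using this
        rw [hbuild]
        rw [PySem.List.slice_from _ (by omega)]
        have : seq.reverse.drop ((seq.length : Int) - p).toNat
            = (seq.take (seq.length - ((seq.length : Int) - p).toNat)).reverse := List.drop_reverse
        rw [this]
        have hnat : seq.length - ((seq.length : Int) - p).toNat = p.toNat := by omega
        rw [hnat]
      · rw [if_neg hA, if_neg (fun hc => hA (hwhile.mpr (hcondB.mp hc.2)))]
        exact ih (p + 1) (by omega) (by omega)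
    · rw [dif_neg hp, dif_neg hp]

-- ===== VERDICT (by name: the statement is the Claim_ definition above) =====
theorem remains_palindrome_spec : Claim_equal_remains_palindrome := by
  intro seq _
  unfold Spec_remains_palindrome remains_palindrome remains_palindrome_alt
  by_cases h : seq = []
  · subst h
    rw [pvLoopA]
    simp
  · rw [if_neg h]
    exact loops_eq seq seq.length 0 (by omega) (by omega)
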